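-- pv_equiv track=rewrite | github.com/houking-can/BDCI2019-NER | process.py | select_candidates
-- ===== SOURCE A (Python) =====
-- def select_candidates(unknown_entities):
--     unknown_entities = list(unknown_entities)
--     tmp = sorted(unknown_entities, key=lambda e: len(e))
--     if tmp != []:
--         unknown_entities = []
--         for i in range(len(tmp) - 1):
--             flag = True
--             for j in range(i + 1, len(tmp)):
--                 if tmp[i] in tmp[j]:
--                     flag = False
--                     break
--             if flag:
--                 unknown_entities.append(tmp[i])
--         unknown_entities.append(tmp[-1])
--     return unknown_entities
-- ===== SOURCE B (Python) =====
-- def select_candidates(unknown_entities):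
--     # Same result as A: after a stable sort by length, keep each entity that is
--     # not a substring of any later entity.  Because substring containment is
--     # transitive and the last (longest) element is always kept, it suffices to
--     # test each entity against the already-KEPT longer entities only: scan the
--     # sorted list from the back, maintaining the kept list.
--     tmp = sorted(unknown_entities, key=lambda e: len(e))
--     kept = []
--     for e in reversed(tmp):
--         if not any(e in k for k in kept):
--             kept.append(e)
--     kept.reverse()
--     return kept
-- ===== Notes on version B (the rewrite author's own statement) =====
-- stated objective: alternative
-- what changed: Instead of testing each entity against every later (longer) entity in the length-sorted list, B scans the sorted list from the back and tests each entity only against the already-kept maximal entities, exploiting transitivity of substring containment.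
import Mathlib
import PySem

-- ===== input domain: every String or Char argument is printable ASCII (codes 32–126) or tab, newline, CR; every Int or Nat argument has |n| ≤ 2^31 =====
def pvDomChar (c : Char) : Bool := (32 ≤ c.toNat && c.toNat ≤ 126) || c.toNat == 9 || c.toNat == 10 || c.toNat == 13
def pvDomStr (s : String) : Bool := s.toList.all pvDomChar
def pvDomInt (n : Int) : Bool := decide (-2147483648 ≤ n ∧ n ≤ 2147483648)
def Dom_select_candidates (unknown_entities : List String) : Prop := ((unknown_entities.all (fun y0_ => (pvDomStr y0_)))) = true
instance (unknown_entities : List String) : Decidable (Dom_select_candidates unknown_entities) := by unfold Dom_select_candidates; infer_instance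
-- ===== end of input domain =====

-- B replaces A's all-pairs "is tmp[i] a substring of some later tmp[j]" scan by a backward
-- scan that tests each entity only against the already-kept (maximal) entities; same result
-- by transitivity of substring containment (objective: alternative, not claimed faster).

-- ===== PORT A =====
def select_candidates (unknown_entities : List String) : List String :=
  let tmp := PySem.List.sorted unknown_entities (fun e => PySem.Str.len e)
  if tmp ≠ [] then
    let out := (PySem.List.pyRange 0 (PySem.List.len tmp - 1)).foldl (fun acc i =>
      -- inner 'for j … if tmp[i] in tmp[j]: flag=False; break' = flag is false iff some later j matches
      let flag := !((PySem.List.pyRange (i + 1) (PySem.List.len tmp)).any (fun j =>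
        PySem.Str.isIn (PySem.List.pyGetD tmp i "") (PySem.List.pyGetD tmp j "")))
      if flag then acc ++ [PySem.List.pyGetD tmp i ""] else acc) []
    out ++ [PySem.List.pyGetD tmp (-1) ""]
  else unknown_entities

-- ===== PORT B =====
def select_candidates_alt (unknown_entities : List String) : List String :=
  let tmp := PySem.List.sorted unknown_entities (fun e => PySem.Str.len e)
  let kept := tmp.reverse.foldl (fun acc e =>
    if acc.any (fun k => PySem.Str.isIn e k) then acc else acc ++ [e]) []
  kept.reverse

-- ===== PRECONDITION & SPEC =====
def Spec_select_candidates (unknown_entities : List String) (out : List String) : Prop := out = select_candidates_alt unknown_entities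
instance (unknown_entities : List String) (out : List String) : Decidable (Spec_select_candidates unknown_entities out) := by unfold Spec_select_candidates; infer_instance

-- ===== CLAIM (what is proved, stated in full; the proofs are below) =====
def Claim_equal_select_candidates : Prop := ∀ (unknown_entities : List String), Dom_select_candidates unknown_entities → Spec_select_candidates unknown_entities (select_candidates unknown_entities)

-- ===== LEMMAS AND PROOFS =====

-- Common recursive characterisation: keep e iff it is not a substring of any later element.
def faSel : List String → List String
  | [] => []
  | [e] => [e]
  | e :: r => if r.any (fun s => PySem.Str.isIn e s) then faSel r else e :: faSel r

-- B's characterisation: keep e iff it is not a substring of any KEPT later element.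
def fbSel : List String → List String
  | [] => []
  | e :: r =>
    let k := fbSel r
    if k.any (fun s => PySem.Str.isIn e s) then k else e :: k

theorem mem_fbSel {x : String} : ∀ {l : List String}, x ∈ fbSel l → x ∈ l := by
  intro l
  induction l with
  | nil => simp [fbSel]
  | cons e r ih =>
    simp only [fbSel]
    split
    · intro h; exact List.mem_cons_of_mem _ (ih h)
    · intro h
      rcases List.mem_cons.mp h with h | h
      · exact h ▸ List.mem_cons_self
      · exact List.mem_cons_of_mem _ (ih h)

theorem exists_fbSel_container {e : String} :
    ∀ {l : List String} {y : String}, y ∈ l → PySem.Str.isIn e y = true →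
      ∃ z ∈ fbSel l, PySem.Str.isIn e z = true := by
  intro l
  induction l with
  | nil => intro y h; simp at h
  | cons a r ih =>
    intro y hy hey
    rcases List.mem_cons.mp hy with rfl | hy'
    · by_cases ha : (fbSel r).any (fun s => PySem.Str.isIn y s) = true
      · rcases List.any_eq_true.mp ha with ⟨z, hz, hyz⟩
        refine ⟨z, ?_, ?_⟩
        · simp only [fbSel]; rw [if_pos ha]; exact hz
        · exact (PySem.Str.isIn_iff_infix e z).mpr
            (((PySem.Str.isIn_iff_infix e y).mp hey).trans
              ((PySem.Str.isIn_iff_infix y z).mp hyz))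
      · refine ⟨y, ?_, hey⟩
        simp only [fbSel]; rw [if_neg ha]; exact List.mem_cons_self
    · rcases ih hy' hey with ⟨z, hz, hez⟩
      refine ⟨z, ?_, hez⟩
      simp only [fbSel]
      split
      · exact hz
      · exact List.mem_cons_of_mem _ hz

theorem any_fbSel (e : String) (l : List String) :
    (fbSel l).any (fun s => PySem.Str.isIn e s) = l.any (fun s => PySem.Str.isIn e s) := by
  by_cases h : l.any (fun s => PySem.Str.isIn e s) = true
  · rcases List.any_eq_true.mp h with ⟨y, hy, hey⟩
    rcases exists_fbSel_container hy hey with ⟨z, hz, hez⟩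
    rw [h, List.any_eq_true]
    exact ⟨z, hz, hez⟩
  · rw [Bool.not_eq_true] at h
    rw [h, Bool.eq_false_iff]
    intro hc
    rcases List.any_eq_true.mp hc with ⟨z, hz, hez⟩
    have : l.any (fun s => PySem.Str.isIn e s) = true :=
      List.any_eq_true.mpr ⟨z, mem_fbSel hz, hez⟩
    rw [h] at this
    exact Bool.false_ne_true this

theorem faSel_eq_fbSel : ∀ l : List String, faSel l = fbSel l := by
  intro l
  induction l with
  | nil => rfl
  | cons e r ih =>
    cases r with
    | nil => simp [faSel, fbSel]
    | cons b t =>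
      simp only [faSel, fbSel, ← any_fbSel e (b :: t), ih]

-- B's fold over the reversed list computes fbSel.
theorem alt_loop_eq_fbSel : ∀ t : List String,
    (t.reverse.foldl (fun acc e =>
      if acc.any (fun k => PySem.Str.isIn e k) then acc else acc ++ [e]) []).reverse = fbSel t := by
  intro t
  induction t with
  | nil => rfl
  | cons e r ih =>
    have hrev : (e :: r).reverse = r.reverse ++ [e] := by simp
    rw [hrev, List.foldl_append]
    simp only [List.foldl_cons, List.foldl_nil, fbSel]
    rw [← ih]
    set K := r.reverse.foldl (fun acc e =>
      if acc.any (fun k => PySem.Str.isIn e k) then acc else acc ++ [e]) [] with hK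
    have hany : K.any (fun k => PySem.Str.isIn e k) = K.reverse.any (fun k => PySem.Str.isIn e k) := by
      rw [List.any_reverse]
    by_cases h : K.any (fun k => PySem.Str.isIn e k) = true
    · rw [if_pos h, if_pos (by rw [← hany]; exact h)]
    · rw [Bool.not_eq_true] at h
      have h' : K.reverse.any (fun k => PySem.Str.isIn e k) = false := by rw [← hany, h]
      rw [if_neg (by rw [h]; exact Bool.false_ne_true), if_neg (by rw [h']; exact Bool.false_ne_true)]
      simp

-- A's indexed double loop, from position a on, computes faSel of the suffix.
theorem a_loop_eq_faSel (t : List String) : ∀ (m a : Nat) (acc : List String),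
    t.length - a = m + 1 → a < t.length →
    (PySem.List.pyRange (a : Int) ((t.length : Int) - 1)).foldl (fun acc i =>
        if !((PySem.List.pyRange (i + 1) ((t.length : Int))).any (fun j =>
          PySem.Str.isIn (PySem.List.pyGetD t i "") (PySem.List.pyGetD t j "")))
        then acc ++ [PySem.List.pyGetD t i ""] else acc) acc
      ++ [PySem.List.pyGetD t (-1) ""] = acc ++ faSel (t.drop a) := by
  intro m
  induction m with
  | zero =>
    intro a acc hm ha
    have hlast : a = t.length - 1 := by omega
    have hne : t ≠ [] := by intro h; subst h; simp at ha
    rw [PySem.List.pyRange_one_eq_nil (by omega), List.foldl_nil,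
      PySem.List.pyGetD_neg_one t "" hne]
    have hdrop : t.drop a = [t.getLast hne] := by
      have h1 : t.drop a = t.drop (t.length - 1) := by rw [hlast]
      rw [h1, List.drop_length_sub_one hne]
    rw [hdrop]; rfl
  | succ m ih =>
    intro a acc hm ha
    have hlt : (a : Int) < (t.length : Int) - 1 := by omega
    rw [PySem.List.pyRange_one_cons hlt, List.foldl_cons]
    -- the inner any over pyRange (a+1) len = any over the dropped suffix
    have hinner : ∀ (i : Int), 0 ≤ i →
        ((PySem.List.pyRange (i + 1) ((t.length : Int))).any (fun j =>
          PySem.Str.isIn (PySem.List.pyGetD t i "") (PySem.List.pyGetD t j "")))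
        = (t.drop (i + 1).toNat).any (fun s => PySem.Str.isIn (PySem.List.pyGetD t i "") s) := by
      intro i hi
      have hmap := PySem.List.map_pyGetD_pyRange t "" (a := i + 1) (by omega)
      rw [PySem.List.len_eq] at hmap
      rw [← hmap, List.any_map]
      rfl
    rw [hinner (a : Int) (by omega)]
    have hgetD : PySem.List.pyGetD t (a : Int) "" = t[a] := by
      simp [PySem.List.pyGetD_natCast, List.getD_eq_getElem?_getD, ha]
    have htoNat : ((a : Int) + 1).toNat = a + 1 := by omega
    have hcast : (a : Int) + 1 = ((a + 1 : Nat) : Int) := by push_cast; ring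
    have hdropa : t.drop a = t[a] :: t.drop (a + 1) := (List.getElem_cons_drop (by omega)).symm
    have hdropne : t.drop (a + 1) ≠ [] := by
      have : t.length - (a + 1) ≠ 0 := by omega
      simp [List.drop_eq_nil_iff]; omega
    have hfa : faSel (t.drop a)
        = if (t.drop (a + 1)).any (fun s => PySem.Str.isIn t[a] s) then faSel (t.drop (a + 1))
          else t[a] :: faSel (t.drop (a + 1)) := by
      rw [hdropa]
      rcases hr : t.drop (a + 1) with _ | ⟨b, tl⟩
      · exact absurd hr hdropne
      · simp only [faSel]
    rw [htoNat, hgetD, hfa]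
    by_cases h : (t.drop (a + 1)).any (fun s => PySem.Str.isIn t[a] s) = true
    · rw [if_neg (by rw [h]; simp), if_pos h]
      rw [hcast, ih (a + 1) acc (by omega) (by omega)]
    · rw [Bool.not_eq_true] at h
      rw [if_pos (by rw [h]; rfl), if_neg (by rw [h]; exact Bool.false_ne_true)]
      rw [hcast, ih (a + 1) (acc ++ [t[a]]) (by omega) (by omega)]
      simp

theorem selA_eq_faSel (l : List String) :
    select_candidates l = faSel (PySem.List.sorted l (fun e => PySem.Str.len e)) := by
  unfold select_candidates
  set t := PySem.List.sorted l (fun e => PySem.Str.len e) with ht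
  by_cases h : t = []
  · rw [if_neg (by simp [h]), h, faSel]
    exact (PySem.List.sorted_eq_nil_iff l _ false).mp h
  · rw [if_pos (by simp [h])]
    have hlen : 0 < t.length := List.length_pos_iff.mpr h
    have := a_loop_eq_faSel t (t.length - 1) 0 [] (by omega) (by omega)
    simpa [PySem.List.len_eq] using this

theorem selB_eq_fbSel (l : List String) :
    select_candidates_alt l = fbSel (PySem.List.sorted l (fun e => PySem.Str.len e)) := by
  unfold select_candidates_alt
  exact alt_loop_eq_fbSel _

-- ===== VERDICT (by name: the statement is the Claim_ definition above) =====
theorem select_candidates_spec : Claim_equal_select_candidates := by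
  intro l _
  unfold Spec_select_candidates
  rw [selA_eq_faSel, selB_eq_fbSel, faSel_eq_fbSel]
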